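-- pv_equiv track=rewrite | github.com/daesik82/GoldSpoon | BigBull/crawler/company_information_crawler.py | clean_get_year
-- ===== SOURCE A (Python) =====
-- def clean_get_year(years, data):
--     year_list = [v.split('/')[0] for i, v in enumerate(data[:-2]) if '(E)' not in v]
--     index_list = [i for i, v in enumerate(data[:-2]) if '(E)' not in v]
--     year_list_copy = year_list.copy()
--     del_count = 0
--     if years is not None:
--         for index, year in enumerate(year_list_copy):
--             if year not in years:
--                 del year_list[index - del_count]
--                 del index_list[index - del_count]
--                 del_count += 1
--
--     return year_list, index_list
-- ===== SOURCE B (Python) =====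
-- def clean_get_year(years, data):
--     year_list = []
--     index_list = []
--     for i, v in enumerate(data[:-2]):
--         if '(E)' in v:
--             continue
--         year = v.split('/')[0]
--         if years is None or year in years:
--             year_list.append(year)
--             index_list.append(i)
--     return year_list, index_list
-- ===== Notes on version B (the rewrite author's own statement) =====
-- stated objective: simpler
-- what changed: One streaming pass over enumerate(data[:-2]) appends each kept (year, index) directly, eliminating the two separate comprehensions, the year_list_copy snapshot and the del-with-offset (del_count) deletion mechanism.
import Mathlib
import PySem

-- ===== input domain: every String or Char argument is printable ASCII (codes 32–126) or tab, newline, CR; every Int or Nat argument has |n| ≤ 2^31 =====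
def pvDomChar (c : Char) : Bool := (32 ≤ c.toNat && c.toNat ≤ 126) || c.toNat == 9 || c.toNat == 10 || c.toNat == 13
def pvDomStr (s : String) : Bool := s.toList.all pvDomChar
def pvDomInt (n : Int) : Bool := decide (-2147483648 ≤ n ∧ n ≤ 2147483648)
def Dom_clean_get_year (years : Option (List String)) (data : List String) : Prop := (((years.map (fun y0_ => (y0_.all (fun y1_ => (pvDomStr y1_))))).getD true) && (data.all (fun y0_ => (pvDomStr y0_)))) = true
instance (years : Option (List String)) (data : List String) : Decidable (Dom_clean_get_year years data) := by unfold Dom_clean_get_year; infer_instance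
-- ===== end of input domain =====

-- B replaces A's build-then-delete-with-offset (copy, del_count, del list[i-del_count]) by one
-- streaming pass that appends each kept (year, index) directly; objective: simpler.

-- ===== PORT A =====
-- v.split('/')[0]: the separator "/" is nonempty (split? is some) and split never
-- returns an empty list, so neither getD default is ever used
def yearOf (v : String) : String :=
  PySem.List.pyGetD ((PySem.Str.split? v "/").getD []) 0 ""

-- A's loop body: del year_list[index-del_count]; del index_list[index-del_count]; del_count += 1.
-- The deletion index equals the number of kept elements so far, hence always in range: eraseIdx is exact.
def cgyStep (ys : List String) (st : List String × List Int × Int) (p : Int × String) : List String × List Int × Int :=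
  if ys.contains p.2 then st
  else (st.1.eraseIdx (p.1 - st.2.2).toNat, st.2.1.eraseIdx (p.1 - st.2.2).toNat, st.2.2 + 1)

def clean_get_year (years : Option (List String)) (data : List String) : List String × List Int :=
  let d := PySem.List.slice data none (some (-2))
  let year_list := ((PySem.List.enumerate d 0).filter (fun p => !(PySem.Str.isIn "(E)" p.2))).map (fun p => yearOf p.2)
  let index_list := ((PySem.List.enumerate d 0).filter (fun p => !(PySem.Str.isIn "(E)" p.2))).map (fun p => p.1)
  match years with
  | none => (year_list, index_list)
  | some ys =>
      let st := (PySem.List.enumerate year_list 0).foldl (cgyStep ys) (year_list, index_list, 0)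
      (st.1, st.2.1)

-- ===== PORT B =====
def clean_get_year_alt (years : Option (List String)) (data : List String) : List String × List Int :=
  (PySem.List.enumerate (PySem.List.slice data none (some (-2))) 0).foldl
    (fun (acc : List String × List Int) p =>
      if PySem.Str.isIn "(E)" p.2 then acc
      else
        let y := yearOf p.2
        if years.isNone || (years.getD []).contains y then (acc.1 ++ [y], acc.2 ++ [p.1]) else acc)
    ([], [])

-- ===== PRECONDITION & SPEC =====
def Spec_clean_get_year (years : Option (List String)) (data : List String) (out : List String × List Int) : Prop := out = clean_get_year_alt years data
instance (years : Option (List String)) (data : List String) (out : List String × List Int) : Decidable (Spec_clean_get_year years data out) := by unfold Spec_clean_get_year; infer_instance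

-- ===== CLAIM (what is proved, stated in full; the proofs are below) =====
def Claim_equal_clean_get_year : Prop := ∀ (years : Option (List String)) (data : List String), Dom_clean_get_year years data → Spec_clean_get_year years data (clean_get_year years data)

-- ===== LEMMAS AND PROOFS =====

-- erasing at the length of the left part deletes the head of the right part
theorem eraseIdx_append_length {α : Type} (l1 : List α) (x : α) (l2 : List α) :
    (l1 ++ x :: l2).eraseIdx l1.length = l1 ++ l2 := by
  induction l1 with
  | nil => rfl
  | cons a t ih => simpa [List.eraseIdx] using ih

-- A's deletion loop over the zipped (year, index) pairs is the paired filter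
theorem cgy_loop (ys : List String) (q : List (String × Int)) :
    ∀ (n : Int) (KY : List String) (KI : List Int) (c : Int), c = n - KY.length → KY.length = KI.length →
    ∃ c', (PySem.List.enumerate (q.map (fun r => r.1)) n).foldl (cgyStep ys)
        (KY ++ q.map (fun r => r.1), KI ++ q.map (fun r => r.2), c)
      = (KY ++ (q.filter (fun r => ys.contains r.1)).map (fun r => r.1),
         KI ++ (q.filter (fun r => ys.contains r.1)).map (fun r => r.2), c') := by
  induction q with
  | nil => intro n KY KI c hc _; exact ⟨c, by simp [PySem.List.enumerate_nil]⟩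
  | cons r t ih =>
      intro n KY KI c hc hlen
      simp only [List.map_cons, PySem.List.enumerate_cons, List.foldl_cons]
      by_cases h : r.1 ∈ ys
      · have hstep : cgyStep ys (KY ++ r.1 :: t.map (fun r => r.1), KI ++ r.2 :: t.map (fun r => r.2), c) (n, r.1)
            = ((KY ++ [r.1]) ++ t.map (fun r => r.1), (KI ++ [r.2]) ++ t.map (fun r => r.2), c) := by
          simp [cgyStep, h]
        rw [hstep]
        obtain ⟨c', hc'⟩ := ih (n + 1) (KY ++ [r.1]) (KI ++ [r.2]) c (by simp; omega) (by simp [hlen])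
        exact ⟨c', by simpa [List.filter_cons, h] using hc'⟩
      · have hstep : cgyStep ys (KY ++ r.1 :: t.map (fun r => r.1), KI ++ r.2 :: t.map (fun r => r.2), c) (n, r.1)
            = (KY ++ t.map (fun r => r.1), KI ++ t.map (fun r => r.2), c + 1) := by
          have hb : ys.contains r.1 = false := by simpa using h
          have hidx : ((n : Int) - c).toNat = KY.length := by omega
          simp only [cgyStep, hb, Bool.false_eq_true, if_false, hidx]
          rw [eraseIdx_append_length KY r.1 (t.map (fun r => r.1)), hlen,
              eraseIdx_append_length KI r.2 (t.map (fun r => r.2))]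
        rw [hstep]
        obtain ⟨c', hc'⟩ := ih (n + 1) KY KI (c + 1) (by omega) hlen
        exact ⟨c', by simpa [List.filter_cons, h] using hc'⟩

-- B's append loop is map-of-filter on the enumerated list
theorem alt_loop (years : Option (List String)) (es : List (Int × String)) :
    ∀ (KY : List String) (KI : List Int),
    es.foldl (fun (acc : List String × List Int) p =>
        if PySem.Str.isIn "(E)" p.2 then acc
        else
          let y := yearOf p.2
          if years.isNone || (years.getD []).contains y then (acc.1 ++ [y], acc.2 ++ [p.1]) else acc)
      (KY, KI)
    = (KY ++ (es.filter (fun p => !(PySem.Str.isIn "(E)" p.2) && (years.isNone || (years.getD []).contains (yearOf p.2)))).map (fun p => yearOf p.2),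
       KI ++ (es.filter (fun p => !(PySem.Str.isIn "(E)" p.2) && (years.isNone || (years.getD []).contains (yearOf p.2)))).map (fun p => p.1)) := by
  induction es with
  | nil => intro KY KI; simp
  | cons e t ih =>
      intro KY KI
      by_cases hp : PySem.Str.isIn "(E)" e.2
      · simp only [List.foldl_cons, hp, if_true, List.filter_cons]
        rw [ih]
        simp
      · by_cases hy : (years.isNone || (years.getD []).contains (yearOf e.2)) = true
        · simp only [List.foldl_cons, hp, Bool.false_eq_true, if_false, hy, if_true, List.filter_cons]
          rw [ih]
          simp
        · simp only [List.foldl_cons, hp, Bool.false_eq_true, if_false, hy, List.filter_cons]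
          rw [ih]
          simp

-- ===== VERDICT (by name: the statement is the Claim_ definition above) =====
theorem clean_get_year_spec : Claim_equal_clean_get_year := by
  intro years data _
  unfold Spec_clean_get_year clean_get_year clean_get_year_alt
  set d := PySem.List.slice data none (some (-2)) with hd
  set E := PySem.List.enumerate d 0 with hE
  set L := E.filter (fun p => !(PySem.Str.isIn "(E)" p.2)) with hL
  rw [alt_loop years E]
  cases years with
  | none =>
      simp
      exact ⟨rfl, rfl⟩
  | some ys =>
      simp only
      have hmf : L.map (fun p => yearOf p.2) = (L.map (fun p => (yearOf p.2, p.1))).map (fun r => r.1) := by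
        simp [List.map_map]
      have hms : L.map (fun p => p.1) = (L.map (fun p => (yearOf p.2, p.1))).map (fun r => r.2) := by
        simp [List.map_map]
      obtain ⟨c', hc'⟩ := cgy_loop ys (L.map (fun p => (yearOf p.2, p.1))) 0 [] [] 0 (by simp) rfl
      simp only [List.nil_append] at hc'
      rw [hmf, hms, hc']
      simp only [List.nil_append, hL, List.filter_map, List.filter_filter, List.map_map]
      simp [Function.comp_def, Bool.and_comm]
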